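-- pv_equiv track=rewrite | github.com/anthonyashco/210517-Reston-Python | rev-01-01-python/casing.py | word_breaker
-- ===== SOURCE A (Python) =====
-- def word_breaker(word, initial):
--     words = []
--     if initial == "snake_case":
--         words = word.split("_")
--     elif initial == "camelCase":
--         cap_index = []
--         for i, letter in enumerate(word):
--             if letter.isupper():
--                 cap_index.append(i)
--         current_index = 0
--         for i in cap_index:
--             words.append(word[current_index:i])
--             current_index = i
--         words.append(word[current_index:])
--     elif initial == "PascalCase":
--         cap_index = []
--         for i, letter in enumerate(word):
--             if letter.isupper() and i != 0:
--                 cap_index.append(i)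
--         current_index = 0
--         for i in cap_index:
--             words.append(word[current_index:i])
--             current_index = i
--         words.append(word[current_index:])
--     elif initial == "kebab-case":
--         words = word.split("-")
--     else:
--         raise Exception("Initial case not found.")
--     return words
-- ===== SOURCE B (Python) =====
-- def word_breaker(word, initial):
--     if initial == "snake_case":
--         return word.split("_")
--     if initial == "kebab-case":
--         return word.split("-")
--     if initial == "camelCase" or initial == "PascalCase":
--         words = []
--         current = ""
--         for i, letter in enumerate(word):
--             if letter.isupper() and (initial == "camelCase" or i != 0):
--                 words.append(current)
--                 current = letter
--             else:
--                 current += letter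
--         words.append(current)
--         return words
--     raise Exception("Initial case not found.")
-- ===== Notes on version B (the rewrite author's own statement) =====
-- stated objective: simpler
-- what changed: The camelCase/PascalCase branches build the word list in one streaming pass with a current-buffer accumulator instead of A's two passes (collect a cap_index list, then slice the word between consecutive indices).
import Mathlib
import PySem

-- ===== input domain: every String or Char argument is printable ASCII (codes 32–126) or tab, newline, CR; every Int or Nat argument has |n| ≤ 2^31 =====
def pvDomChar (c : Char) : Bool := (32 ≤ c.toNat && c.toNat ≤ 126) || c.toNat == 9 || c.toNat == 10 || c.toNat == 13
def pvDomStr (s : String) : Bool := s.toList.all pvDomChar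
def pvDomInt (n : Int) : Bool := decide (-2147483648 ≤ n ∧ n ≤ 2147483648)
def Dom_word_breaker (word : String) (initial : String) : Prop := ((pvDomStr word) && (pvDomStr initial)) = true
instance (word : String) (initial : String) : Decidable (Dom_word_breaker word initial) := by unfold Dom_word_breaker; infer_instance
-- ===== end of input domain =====

-- B replaces A's two-pass cap_index-then-slice camel/Pascal branches by a single streaming
-- pass with a current-buffer accumulator (objective: simpler decomposition, same cost).

-- ===== PORT A =====
-- A's first camel/Pascal loop: collect the indices of the capitals (cond is the loop's test).
def pvCapFold (cond : Int → Char → Bool) (cs : List Char) : List Int :=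
  (PySem.List.enumerate cs).foldl (fun acc ic => if cond ic.1 ic.2 then acc ++ [ic.1] else acc) []

-- A's second loop: append word[current_index:i] for each capital index, tracking current_index.
def pvSliceFold (cs : List Char) (cap : List Int) : List (List Char) × Int :=
  cap.foldl (fun p i => (p.1 ++ [PySem.List.slice cs (some p.2) (some i)], i)) ([], 0)

def word_breaker (word : String) (initial : String) : List String :=
  if initial = "snake_case" then
    (PySem.Chars.splitOn word.toList "_".toList).map String.ofList
  else if initial = "camelCase" then
    let cs := word.toList
    let st := pvSliceFold cs (pvCapFold (fun _ c => PySem.Chars.isupper c) cs)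
    (st.1 ++ [PySem.List.slice cs (some st.2) none]).map String.ofList
  else if initial = "PascalCase" then
    let cs := word.toList
    let st := pvSliceFold cs (pvCapFold (fun i c => PySem.Chars.isupper c && i != 0) cs)
    (st.1 ++ [PySem.List.slice cs (some st.2) none]).map String.ofList
  else if initial = "kebab-case" then
    (PySem.Chars.splitOn word.toList "-".toList).map String.ofList
  else []  -- unreachable under Pre_word_breaker (Python raises Exception here)

-- ===== PORT B =====
-- B's single pass: (words, current) accumulator over enumerate(word).
def pvScan (cond : Int → Char → Bool) (cs : List Char) : List (List Char) :=
  let st := (PySem.List.enumerate cs).foldl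
    (fun (p : List (List Char) × List Char) ic =>
      if cond ic.1 ic.2 then (p.1 ++ [p.2], [ic.2]) else (p.1, p.2 ++ [ic.2]))
    ([], [])
  st.1 ++ [st.2]

def word_breaker_alt (word : String) (initial : String) : List String :=
  if initial = "snake_case" then
    (PySem.Chars.splitOn word.toList "_".toList).map String.ofList
  else if initial = "kebab-case" then
    (PySem.Chars.splitOn word.toList "-".toList).map String.ofList
  else if initial = "camelCase" || initial = "PascalCase" then
    (pvScan (fun i c => PySem.Chars.isupper c && (initial == "camelCase" || i != 0))
      word.toList).map String.ofList
  else []  -- unreachable under Pre_word_breaker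

-- ===== PRECONDITION & SPEC =====
-- A raises Exception("Initial case not found.") for any other `initial`; Pre_ excludes exactly those.
def Pre_word_breaker (word : String) (initial : String) : Prop :=
  initial = "snake_case" ∨ initial = "camelCase" ∨ initial = "PascalCase" ∨ initial = "kebab-case"
instance (word : String) (initial : String) : Decidable (Pre_word_breaker word initial) := by
  unfold Pre_word_breaker; infer_instance
def pvWitness_word_breaker : String × String := ("toCamelCase", "camelCase")

def Spec_word_breaker (word : String) (initial : String) (out : List String) : Prop := out = word_breaker_alt word initial
instance (word : String) (initial : String) (out : List String) : Decidable (Spec_word_breaker word initial out) := by unfold Spec_word_breaker; infer_instance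

-- ===== CLAIM (what is proved, stated in full; the proofs are below) =====
def Claim_equal_word_breaker : Prop := ∀ (word : String) (initial : String), Dom_word_breaker word initial → Pre_word_breaker word initial → Spec_word_breaker word initial (word_breaker word initial)

-- ===== LEMMAS AND PROOFS =====

-- A's first loop is a filter-map of enumerate.
lemma foldl_push_filter {α β : Type} (p : α → Bool) (f : α → β) (xs : List α) (init : List β) :
    xs.foldl (fun acc x => if p x then acc ++ [f x] else acc) init
      = init ++ (xs.filter p).map f := by
  induction xs generalizing init with
  | nil => simp
  | cons x xs ih =>
    by_cases h : p x <;> simp [List.foldl_cons, h, ih]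

lemma capFold_eq (cond : Int → Char → Bool) (cs : List Char) :
    pvCapFold cond cs
      = ((PySem.List.enumerate cs).filter (fun ic => cond ic.1 ic.2)).map (·.1) := by
  simpa using foldl_push_filter (fun ic => cond ic.1 ic.2) (·.1) (PySem.List.enumerate cs) []

lemma capFold_mem (cond : Int → Char → Bool) (cs : List Char) {i : Int}
    (h : i ∈ pvCapFold cond cs) : ∃ k : Nat, i = (k : Int) ∧ k < cs.length := by
  rw [capFold_eq] at h
  rcases List.mem_map.1 h with ⟨p, hp, rfl⟩
  rcases (PySem.List.mem_enumerate_iff _ _ _).1 (List.mem_of_mem_filter hp) with ⟨k, hk, rfl⟩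
  exact ⟨k, by simp, hk⟩

lemma capFold_append (cond : Int → Char → Bool) (cs : List Char) (c : Char) :
    pvCapFold cond (cs ++ [c])
      = pvCapFold cond cs
        ++ (if cond (cs.length : Int) c then [(cs.length : Int)] else []) := by
  simp only [capFold_eq, PySem.List.enumerate_append, List.filter_append, List.map_append]
  congr 1
  by_cases h : cond (cs.length : Int) c <;> simp [PySem.List.enumerate, h]

-- slicing ignores a character appended past both bounds
lemma slice_append_of_le (cs : List Char) (c : Char) {n k : Nat}
    (hn : n ≤ cs.length) (hk : k ≤ cs.length) :
    PySem.List.slice (cs ++ [c]) (some (n : Int)) (some (k : Int))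
      = PySem.List.slice cs (some (n : Int)) (some (k : Int)) := by
  rw [PySem.List.slice_natCast, PySem.List.slice_natCast,
    List.drop_append_of_le_length hn, List.take_append_of_le_length (by simp; omega)]

-- the second loop of A is unchanged by appending a character, as long as all indices stay inside cs
lemma sliceFold_ext (cs : List Char) (c : Char) :
    ∀ (cap : List Int), (∀ i ∈ cap, ∃ k : Nat, i = (k : Int) ∧ k ≤ cs.length) →
    ∀ (ws : List (List Char)) (n : Nat), n ≤ cs.length →
    cap.foldl (fun p i => (p.1 ++ [PySem.List.slice (cs ++ [c]) (some p.2) (some i)], i)) (ws, (n : Int))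
      = cap.foldl (fun p i => (p.1 ++ [PySem.List.slice cs (some p.2) (some i)], i)) (ws, (n : Int)) := by
  intro cap
  induction cap with
  | nil => intro _ ws n _; rfl
  | cons i cap ih =>
    intro hmem ws n hn
    rcases hmem i (by simp) with ⟨k, rfl, hk⟩
    simp only [List.foldl_cons, slice_append_of_le cs c hn hk]
    exact ih (fun j hj => hmem j (by simp [hj])) _ k hk

-- main invariant: B's running state mirrors A's (words so far, suffix from current_index)
lemma scan_inv (cond : Int → Char → Bool) (cs : List Char) :
    ∃ n : Nat,
      (pvSliceFold cs (pvCapFold cond cs)).2 = (n : Int) ∧ n ≤ cs.length ∧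
      ((PySem.List.enumerate cs).foldl
        (fun (p : List (List Char) × List Char) ic =>
          if cond ic.1 ic.2 then (p.1 ++ [p.2], [ic.2]) else (p.1, p.2 ++ [ic.2]))
        ([], []))
        = ((pvSliceFold cs (pvCapFold cond cs)).1, cs.drop n) := by
  induction cs using List.reverseRecOn with
  | nil => exact ⟨0, by simp [pvSliceFold, pvCapFold, PySem.List.enumerate], by simp,
      by simp [pvSliceFold, pvCapFold, PySem.List.enumerate]⟩
  | append_singleton cs c ih =>
    rcases ih with ⟨n, hA2, hn, hB⟩
    have hmem : ∀ i ∈ pvCapFold cond cs, ∃ k : Nat, i = (k : Int) ∧ k ≤ cs.length := by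
      intro i hi; rcases capFold_mem cond cs hi with ⟨k, rfl, hk⟩; exact ⟨k, rfl, hk.le⟩
    have henum : PySem.List.enumerate (cs ++ [c])
        = PySem.List.enumerate cs ++ [((cs.length : Int), c)] := by
      rw [PySem.List.enumerate_append]; simp [PySem.List.enumerate]
    have hSF : pvSliceFold (cs ++ [c]) (pvCapFold cond cs) = pvSliceFold cs (pvCapFold cond cs) := by
      unfold pvSliceFold
      exact sliceFold_ext cs c _ hmem [] 0 (by simp)
    have hsplit : pvSliceFold (cs ++ [c]) (pvCapFold cond (cs ++ [c]))
        = (pvCapFold cond cs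
            ++ (if cond (cs.length : Int) c then [(cs.length : Int)] else [])).foldl
            (fun p i => (p.1 ++ [PySem.List.slice (cs ++ [c]) (some p.2) (some i)], i)) ([], 0) := by
      rw [capFold_append]; rfl
    by_cases hc : cond (cs.length : Int) c
    · refine ⟨cs.length, ?_, by simp, ?_⟩
      · rw [hsplit, if_pos hc, List.foldl_append]
        simp [List.foldl_cons]
      · rw [henum, List.foldl_append, hB, hsplit, if_pos hc, List.foldl_append]
        simp only [List.foldl_cons, List.foldl_nil]
        rw [if_pos hc,
          show ((pvCapFold cond cs).foldl
            (fun p i => (p.1 ++ [PySem.List.slice (cs ++ [c]) (some p.2) (some i)], i)) ([], 0))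
            = pvSliceFold (cs ++ [c]) (pvCapFold cond cs) from rfl, hSF, hA2]
        have hslice : PySem.List.slice (cs ++ [c]) (some (n : Int)) (some ((cs.length : Nat) : Int))
            = cs.drop n := by
          rw [PySem.List.slice_natCast, List.drop_append_of_le_length hn,
            List.take_append_of_le_length (by simp)]
          exact List.take_of_length_le (by simp)
        rw [hslice]
        simp
    · refine ⟨n, ?_, by simpa using hn.trans (by simp), ?_⟩
      · rw [hsplit, if_neg hc, List.append_nil,
          show ((pvCapFold cond cs).foldl
            (fun p i => (p.1 ++ [PySem.List.slice (cs ++ [c]) (some p.2) (some i)], i)) ([], 0))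
            = pvSliceFold (cs ++ [c]) (pvCapFold cond cs) from rfl, hSF]
        exact hA2
      · rw [henum, List.foldl_append, hB, hsplit, if_neg hc, List.append_nil]
        simp only [List.foldl_cons, List.foldl_nil]
        rw [if_neg hc,
          show ((pvCapFold cond cs).foldl
            (fun p i => (p.1 ++ [PySem.List.slice (cs ++ [c]) (some p.2) (some i)], i)) ([], 0))
            = pvSliceFold (cs ++ [c]) (pvCapFold cond cs) from rfl, hSF]
        rw [List.drop_append_of_le_length hn]

-- the two camel/Pascal decompositions agree word by word
lemma scan_eq (cond : Int → Char → Bool) (cs : List Char) :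
    pvScan cond cs
      = (pvSliceFold cs (pvCapFold cond cs)).1
        ++ [PySem.List.slice cs (some (pvSliceFold cs (pvCapFold cond cs)).2) none] := by
  rcases scan_inv cond cs with ⟨n, hA2, _, hB⟩
  unfold pvScan
  rw [hB, hA2, PySem.List.slice_from_natCast]

-- ===== VERDICT (by name: the statement is the Claim_ definition above) =====
theorem word_breaker_spec : Claim_equal_word_breaker := by
  intro word initial _ hpre
  unfold Spec_word_breaker word_breaker word_breaker_alt
  rcases hpre with rfl | rfl | rfl | rfl
  · simp
  · have hcond : (fun (i : Int) (c : Char) =>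
        PySem.Chars.isupper c && (("camelCase" : String) == "camelCase" || i != 0))
        = (fun (_ : Int) (c : Char) => PySem.Chars.isupper c) := by
      funext i c; simp
    simp only [String.reduceEq, if_false, if_true]
    rw [hcond, scan_eq]
    simp
  · have hcond : (fun (i : Int) (c : Char) =>
        PySem.Chars.isupper c && (("PascalCase" : String) == "camelCase" || i != 0))
        = (fun (i : Int) (c : Char) => PySem.Chars.isupper c && i != 0) := by
      funext i c; simp
    simp only [String.reduceEq, if_false, if_true]
    rw [hcond, scan_eq]
    simp
  · simp
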